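-- pv_equiv track=rewrite | github.com/amymhaddad/algorithmPractice | algoExpert/generate_document/generate.py | generateDocument_v2
-- ===== SOURCE A (Python) =====
-- def generateDocument_v2(characters, document):
--     if len(characters) < len(document):
--         return False
--
--     char_counter = {}
--
--     for char in characters:
--         char_counter[char] = char_counter.get(char, 0) + 1
--     for char in document:
--         if char not in char_counter:
--             return False
--         else:
--             char_counter[char] -= 1
--             if char_counter[char] < 0:
--                 return False
--     return True
-- ===== SOURCE B (Python) =====
-- def generateDocument_v2(characters, document):
--     return all(document.count(c) <= characters.count(c) for c in set(document))
-- ===== Notes on version B (the rewrite author's own statement) =====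
-- stated objective: simpler
-- what changed: Replaces the mutable decrement-a-dict loop with early returns (plus a redundant length guard) by a single declarative comparison: for every distinct character of the document, its count in the document must not exceed its count in characters.
import Mathlib
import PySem

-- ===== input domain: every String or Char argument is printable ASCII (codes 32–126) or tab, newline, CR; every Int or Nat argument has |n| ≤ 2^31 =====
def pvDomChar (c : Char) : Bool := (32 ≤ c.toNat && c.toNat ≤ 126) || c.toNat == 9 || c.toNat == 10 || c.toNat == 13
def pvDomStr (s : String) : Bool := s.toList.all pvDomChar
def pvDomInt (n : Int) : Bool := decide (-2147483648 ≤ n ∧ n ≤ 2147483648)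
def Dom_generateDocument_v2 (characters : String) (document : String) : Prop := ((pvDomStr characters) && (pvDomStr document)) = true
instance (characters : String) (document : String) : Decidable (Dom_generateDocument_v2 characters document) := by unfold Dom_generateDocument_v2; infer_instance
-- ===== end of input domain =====

-- B replaces A's decrement-a-counter loop with early returns by a declarative
-- per-distinct-character count comparison (simpler, not faster). No mutation of
-- arguments in either version.

-- ===== PORT A =====
-- the second 'for' loop of A: walk the document, decrementing the counter,
-- with A's two early 'return False' exits
def gdGo (l : List Char) (d : PySem.Dict Char Int) : Bool :=
  match l with
  | [] => true
  | c :: rest =>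
    match d.get? c with
    | none => false                              -- 'if char not in char_counter: return False'
    | some v =>
      let d' := d.insert c (v - 1)               -- 'char_counter[char] -= 1'
      if d'.getD c 0 < 0 then false              -- 'if char_counter[char] < 0: return False'
      else gdGo rest d'

def generateDocument_v2 (characters : String) (document : String) : Bool :=
  if characters.toList.length < document.toList.length then false
  else
    let charCounter :=
      characters.toList.foldl (fun d ch => d.insert ch (d.getD ch 0 + 1)) PySem.Dict.empty
    gdGo document.toList charCounter

-- ===== PORT B =====
def generateDocument_v2_alt (characters : String) (document : String) : Bool :=
  (PySem.Set.ofList document.toList).all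
    (fun c => document.toList.count c ≤ characters.toList.count c)

-- ===== PRECONDITION & SPEC =====
def Spec_generateDocument_v2 (characters : String) (document : String) (out : Bool) : Prop := out = generateDocument_v2_alt characters document
instance (characters : String) (document : String) (out : Bool) : Decidable (Spec_generateDocument_v2 characters document out) := by unfold Spec_generateDocument_v2; infer_instance

-- ===== CLAIM (what is proved, stated in full; the proofs are below) =====
def Claim_equal_generateDocument_v2 : Prop := ∀ (characters : String) (document : String), Dom_generateDocument_v2 characters document → Spec_generateDocument_v2 characters document (generateDocument_v2 characters document)

-- ===== LEMMAS AND PROOFS =====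

-- characterisation of A's document loop
lemma gdGo_iff (l : List Char) (d : PySem.Dict Char Int) :
    gdGo l d = true ↔ ∀ c ∈ l, d.contains c = true ∧ (l.count c : Int) ≤ d.getD c 0 := by
  induction l generalizing d with
  | nil => simp [gdGo]
  | cons c rest ih =>
    simp only [gdGo]
    cases hv : d.get? c with
    | none =>
      simp only [Bool.false_eq_true, false_iff]
      intro h
      have := (h c (by simp)).1
      rw [(PySem.Dict.get?_eq_none_iff_contains d c).mp hv] at this
      exact Bool.false_ne_true this
    | some v =>
      have hgd : d.getD c 0 = v := PySem.Dict.getD_of_get?_eq_some d 0 hv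
      have hcont : d.contains c = true := by
        cases h : d.contains c with
        | false => rw [(PySem.Dict.get?_eq_none_iff_contains d c).mpr h] at hv; cases hv
        | true => rfl
      have hred : (match (some v : Option Int) with
          | none => false
          | some w => if (d.insert c (w - 1)).getD c 0 < 0 then false
                      else gdGo rest (d.insert c (w - 1)))
          = (if (d.insert c (v - 1)).getD c 0 < 0 then false
             else gdGo rest (d.insert c (v - 1))) := rfl
      rw [hred, PySem.Dict.getD_insert_self]
      by_cases hneg : v - 1 < 0
      · simp only [if_pos hneg, Bool.false_eq_true, false_iff]
        intro h
        have h2 := (h c (by simp)).2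
        rw [hgd] at h2
        have : (1 : Int) ≤ ((c :: rest).count c : Int) := by
          have : 1 ≤ (c :: rest).count c := by simp [List.count_cons]
          exact_mod_cast this
        omega
      · rw [if_neg hneg, ih]
        constructor
        · intro h x hx
          by_cases hxc : x = c
          · subst hxc
            refine ⟨hcont, ?_⟩
            rw [hgd]
            by_cases hm : x ∈ rest
            · have h2 := (h x hm).2
              rw [PySem.Dict.getD_insert_self] at h2
              have hcc : (x :: rest).count x = rest.count x + 1 := by simp
              rw [hcc]; push_cast; omega
            · have hcc : (x :: rest).count x = 1 := by
                simp [List.count_eq_zero_of_not_mem hm]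
              rw [hcc]; omega
          · have hxr : x ∈ rest := by
              rcases List.mem_cons.mp hx with h' | h'
              · exact absurd h' hxc
              · exact h'
            obtain ⟨h1, h2⟩ := h x hxr
            rw [PySem.Dict.contains_insert] at h1
            rw [PySem.Dict.getD_insert_of_ne d _ _ hxc] at h2
            refine ⟨?_, ?_⟩
            · simpa [hxc] using h1
            · have hcc : (c :: rest).count x = rest.count x := by
                simp [Ne.symm hxc]
              rw [hcc]; exact h2
        · intro h x hx
          by_cases hxc : x = c
          · subst hxc
            refine ⟨by rw [PySem.Dict.contains_insert]; simp, ?_⟩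
            rw [PySem.Dict.getD_insert_self]
            have h2 := (h x (by simp)).2
            rw [hgd] at h2
            have hcc : (x :: rest).count x = rest.count x + 1 := by simp
            rw [hcc] at h2; push_cast at h2 ⊢; omega
          · obtain ⟨h1, h2⟩ := h x (List.mem_cons_of_mem _ hx)
            refine ⟨by rw [PySem.Dict.contains_insert]; simp [h1], ?_⟩
            rw [PySem.Dict.getD_insert_of_ne d _ _ hxc]
            have hcc : (c :: rest).count x = rest.count x := by
              simp [Ne.symm hxc]
            rw [hcc] at h2; exact h2

-- pigeonhole: if every document character is covered, characters is at least as long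
lemma length_le_of_counts_le (cs ds : List Char)
    (h : ∀ c ∈ ds, ds.count c ≤ cs.count c) : ds.length ≤ cs.length := by
  have hlen : ∀ l : List Char, l.length = ∑ x ∈ l.toFinset, l.count x := by
    intro l
    have h := Multiset.toFinset_sum_count_eq (l : Multiset Char)
    simpa using h.symm
  calc ds.length = ∑ x ∈ ds.toFinset, ds.count x := hlen ds
    _ ≤ ∑ x ∈ ds.toFinset, cs.count x :=
        Finset.sum_le_sum (fun x hx => h x (List.mem_toFinset.mp hx))
    _ ≤ ∑ x ∈ cs.toFinset, cs.count x := by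
        apply Finset.sum_le_sum_of_ne_zero
        intro x _ hz
        exact List.mem_toFinset.mpr (List.count_pos_iff.mp (Nat.pos_of_ne_zero hz))
    _ = cs.length := (hlen cs).symm

-- B = true iff every document character's count is covered
lemma alt_iff (characters document : String) :
    generateDocument_v2_alt characters document = true ↔
      ∀ c ∈ document.toList, document.toList.count c ≤ characters.toList.count c := by
  unfold generateDocument_v2_alt
  simp only [List.all_eq_true, decide_eq_true_eq]
  constructor
  · intro h c hc
    exact h c (by rw [PySem.Set.mem_ofList]; exact hc)
  · intro h c hc
    exact h c (by rwa [PySem.Set.mem_ofList] at hc)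

-- ===== VERDICT (by name: the statement is the Claim_ definition above) =====
theorem generateDocument_v2_spec : Claim_equal_generateDocument_v2 := by
  intro characters document _
  unfold Spec_generateDocument_v2 generateDocument_v2
  set cs := characters.toList with hcs
  set ds := document.toList with hds
  by_cases hlen : cs.length < ds.length
  · rw [if_pos hlen]
    cases hb : generateDocument_v2_alt characters document with
    | false => rfl
    | true =>
      exfalso
      have := length_le_of_counts_le cs ds ((alt_iff characters document).mp hb)
      omega
  · rw [if_neg hlen]
    rw [PySem.Dict.foldl_insert_getD_add_one_eq_counter]
    have hiff : gdGo ds (PySem.Dict.counter cs) = true ↔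
        generateDocument_v2_alt characters document = true := by
      rw [gdGo_iff, alt_iff]
      constructor
      · intro h c hc
        have h2 := (h c hc).2
        rw [PySem.Dict.getD_counter] at h2
        exact_mod_cast h2
      · intro h c hc
        have hle := h c hc
        have hpos : 0 < ds.count c := List.count_pos_iff.mpr hc
        refine ⟨?_, ?_⟩
        · rw [PySem.Dict.contains_counter]
          have : c ∈ cs := List.count_pos_iff.mp (lt_of_lt_of_le hpos hle)
          simpa using this
        · rw [PySem.Dict.getD_counter]; exact_mod_cast hle
    cases hA : gdGo ds (PySem.Dict.counter cs) with
    | true => exact (hiff.mp hA).symm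
    | false =>
      cases hB : generateDocument_v2_alt characters document with
      | false => rfl
      | true => rw [hiff.mpr hB] at hA; cases hA
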